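-- pv_equiv track=rewrite | github.com/Augenstern-org/practice | program_des/sym251022/program.py | func4
-- ===== SOURCE A (Python) =====
-- def func4(list_A, list_B):
--     rlist = []
--     for i in range(0, len(list_A)):
--         a = list_A[i].lower()
--         b = list_B[i].lower()
--         same_char = []
--         for ch in a:
--             if ch in b and ch not in same_char:
--                 same_char.append(ch)
--         same_char.sort()
--         rlist.append("".join(same_char))
--     return rlist
--     pass
-- ===== SOURCE B (Python) =====
-- def func4(list_A, list_B):
--     rlist = []
--     for a, b in zip(list_A, list_B):
--         xs = sorted(set(a.lower()))
--         ys = sorted(set(b.lower()))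
--         i = j = 0
--         common = []
--         while i < len(xs) and j < len(ys):
--             if xs[i] < ys[j]:
--                 i += 1
--             elif ys[j] < xs[i]:
--                 j += 1
--             else:
--                 common.append(xs[i])
--                 i += 1
--                 j += 1
--         rlist.append("".join(common))
--     return rlist
-- ===== Notes on version B (the rewrite author's own statement) =====
-- stated objective: alternative
-- what changed: Replaces the per-character nested scan (substring test + membership in the growing accumulator, then a trailing sort) by sorting the deduplicated characters of each string up front and intersecting the two sorted sequences with a two-pointer linear merge; iteration over zipped pairs instead of indexing.
import Mathlib
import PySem

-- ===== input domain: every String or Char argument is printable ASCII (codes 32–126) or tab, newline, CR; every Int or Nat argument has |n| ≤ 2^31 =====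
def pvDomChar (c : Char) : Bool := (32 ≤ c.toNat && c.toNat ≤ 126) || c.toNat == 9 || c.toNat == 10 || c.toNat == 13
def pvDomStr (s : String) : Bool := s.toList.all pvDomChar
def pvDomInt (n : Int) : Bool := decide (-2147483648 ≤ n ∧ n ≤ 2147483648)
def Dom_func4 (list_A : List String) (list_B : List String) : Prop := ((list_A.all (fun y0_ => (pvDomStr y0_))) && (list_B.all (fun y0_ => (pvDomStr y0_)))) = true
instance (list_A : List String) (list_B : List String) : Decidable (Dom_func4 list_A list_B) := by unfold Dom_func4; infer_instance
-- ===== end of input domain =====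

-- B replaces A's nested scan-and-contains + trailing sort by sorted-dedup per string and a
-- two-pointer merge intersection; same return values wherever A returns (Pre_: equal-length access).


-- ===== PORT A =====
-- 'ch in b' on a single character ch is the substring test; '"".join(same_char)' on a list of
-- single characters is String.ofList of that character list.
def func4 (list_A : List String) (list_B : List String) : List String :=
  (PySem.List.pyRange 0 (PySem.List.len list_A) 1).foldl (fun rlist i =>
    let a := (PySem.Str.lower (PySem.List.pyGetD list_A i "")).toList
    let b := (PySem.Str.lower (PySem.List.pyGetD list_B i "")).toList
    let same_char := a.foldl (fun sc ch =>
      if PySem.Chars.isIn [ch] b && !(sc.contains ch) then sc ++ [ch] else sc) []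
    rlist ++ [String.ofList (PySem.List.sorted same_char (fun x => x) false)]) []

-- ===== PORT B =====
-- the two-pointer while-loop of Source B, as structural recursion on the two sorted lists
def mergeInter : List Char → List Char → List Char
  | [], _ => []
  | _ :: _, [] => []
  | x :: xs, y :: ys =>
    if x < y then mergeInter xs (y :: ys)
    else if y < x then mergeInter (x :: xs) ys
    else x :: mergeInter xs ys
termination_by xs ys => xs.length + ys.length

def func4_alt (list_A : List String) (list_B : List String) : List String :=
  (list_A.zip list_B).map (fun p =>
    let xs := PySem.List.sorted (PySem.Set.ofList (PySem.Str.lower p.1).toList) (fun x => x) false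
    let ys := PySem.List.sorted (PySem.Set.ofList (PySem.Str.lower p.2).toList) (fun x => x) false
    String.ofList (mergeInter xs ys))

-- ===== PRECONDITION & SPEC =====
-- A indexes list_B[i] for every i < len(list_A): it raises IndexError when list_B is shorter.
def Pre_func4 (list_A : List String) (list_B : List String) : Prop :=
  list_A.length ≤ list_B.length
instance (list_A : List String) (list_B : List String) : Decidable (Pre_func4 list_A list_B) := by unfold Pre_func4; infer_instance
def pvWitness_func4 : List String × List String := (["Hello"], ["World"])

def Spec_func4 (list_A : List String) (list_B : List String) (out : List String) : Prop := out = func4_alt list_A list_B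
instance (list_A : List String) (list_B : List String) (out : List String) : Decidable (Spec_func4 list_A list_B out) := by unfold Spec_func4; infer_instance

-- ===== CLAIM (what is proved, stated in full; the proofs are below) =====
def Claim_equal_func4 : Prop := ∀ (list_A : List String) (list_B : List String), Dom_func4 list_A list_B → Pre_func4 list_A list_B → Spec_func4 list_A list_B (func4 list_A list_B)
-- ===== LEMMAS AND PROOFS =====

-- single-character 'in' on a string is membership
theorem isIn_singleton_iff (c : Char) (l : List Char) :
    PySem.Chars.isIn [c] l = true ↔ c ∈ l := by
  rw [PySem.Chars.isIn_iff_infix]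
  constructor
  · intro h; exact List.singleton_sublist.mp h.sublist
  · intro h
    obtain ⟨sfx, t, rfl⟩ := List.append_of_mem h
    exact ⟨sfx, t, by simp⟩

-- A's inner loop: accumulator invariant (nodup, membership)
theorem sameChar_loop (bl : List Char) : ∀ (al acc : List Char), acc.Nodup →
    (al.foldl (fun sc ch =>
      if PySem.Chars.isIn [ch] bl && !(sc.contains ch) then sc ++ [ch] else sc) acc).Nodup ∧
    ∀ c, c ∈ (al.foldl (fun sc ch =>
      if PySem.Chars.isIn [ch] bl && !(sc.contains ch) then sc ++ [ch] else sc) acc) ↔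
      c ∈ acc ∨ (c ∈ al ∧ c ∈ bl)
  | [], acc, h => by refine ⟨by simpa using h, fun c => by simp⟩
  | ch :: al, acc, h => by
    simp only [List.foldl_cons]
    by_cases hcnd : (PySem.Chars.isIn [ch] bl && !(acc.contains ch)) = true
    · rw [if_pos hcnd]
      simp only [Bool.and_eq_true, Bool.not_eq_true', List.contains_eq_mem,
        decide_eq_false_iff_not] at hcnd
      have hmem : ch ∈ bl := (isIn_singleton_iff ch bl).mp hcnd.1
      have hnd : (acc ++ [ch]).Nodup := by
        simp [List.nodup_append, h]
        intro a ha hae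
        exact hcnd.2 (hae ▸ ha)
      obtain ⟨h1, h2⟩ := sameChar_loop bl al (acc ++ [ch]) hnd
      refine ⟨h1, fun c => ?_⟩
      rw [h2]
      simp only [List.mem_append, List.mem_cons, List.not_mem_nil, or_false]
      constructor
      · rintro ((hc | rfl) | ⟨hc, hb⟩)
        · exact Or.inl hc
        · exact Or.inr ⟨Or.inl rfl, hmem⟩
        · exact Or.inr ⟨Or.inr hc, hb⟩
      · rintro (hc | ⟨(rfl | hc), hb⟩)
        · exact Or.inl (Or.inl hc)
        · exact Or.inl (Or.inr rfl)
        · exact Or.inr ⟨hc, hb⟩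
    · rw [if_neg hcnd]
      simp only [Bool.and_eq_true, Bool.not_eq_true', List.contains_eq_mem,
        decide_eq_false_iff_not, not_and, not_not] at hcnd
      obtain ⟨h1, h2⟩ := sameChar_loop bl al acc h
      refine ⟨h1, fun c => ?_⟩
      rw [h2]
      simp only [List.mem_cons]
      constructor
      · rintro (hc | ⟨hc, hb⟩)
        · exact Or.inl hc
        · exact Or.inr ⟨Or.inr hc, hb⟩
      · rintro (hc | ⟨(rfl | hc), hb⟩)
        · exact Or.inl hc
        · exact Or.inl (hcnd ((isIn_singleton_iff c bl).mpr hb))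
        · exact Or.inr ⟨hc, hb⟩

theorem mem_mergeInter (xs ys : List Char) (hx : xs.Pairwise (· < ·)) (hy : ys.Pairwise (· < ·)) :
    ∀ c, c ∈ mergeInter xs ys ↔ c ∈ xs ∧ c ∈ ys := by
  induction xs, ys using mergeInter.induct with
  | case1 ys => simp [mergeInter]
  | case2 x xs => simp [mergeInter]
  | case3 x xs y ys hlt ih =>
    intro c
    rw [show mergeInter (x :: xs) (y :: ys) = mergeInter xs (y :: ys) by
      rw [mergeInter]; simp [hlt]]
    rw [ih (List.Pairwise.of_cons hx) hy c]
    have hxny : ∀ z ∈ y :: ys, x ≠ z := by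
      intro z hz
      rcases List.mem_cons.mp hz with rfl | hz
      · exact ne_of_lt hlt
      · exact ne_of_lt (lt_trans hlt (List.rel_of_pairwise_cons hy hz))
    constructor
    · rintro ⟨h1, h2⟩; exact ⟨List.mem_cons_of_mem x h1, h2⟩
    · rintro ⟨h1, h2⟩
      rcases List.mem_cons.mp h1 with rfl | h1
      · exact absurd rfl (hxny c h2)
      · exact ⟨h1, h2⟩
  | case4 x xs y ys hlt hgt ih =>
    intro c
    rw [show mergeInter (x :: xs) (y :: ys) = mergeInter (x :: xs) ys by
      rw [mergeInter]; simp [hlt, hgt]]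
    rw [ih hx (List.Pairwise.of_cons hy) c]
    have hynx : ∀ z ∈ x :: xs, y ≠ z := by
      intro z hz
      rcases List.mem_cons.mp hz with rfl | hz
      · exact ne_of_lt hgt
      · exact ne_of_lt (lt_trans hgt (List.rel_of_pairwise_cons hx hz))
    constructor
    · rintro ⟨h1, h2⟩; exact ⟨h1, List.mem_cons_of_mem y h2⟩
    · rintro ⟨h1, h2⟩
      rcases List.mem_cons.mp h2 with rfl | h2
      · exact absurd rfl (hynx c h1)
      · exact ⟨h1, h2⟩
  | case5 x xs y ys hlt hgt ih =>
    intro c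
    have hxy : x = y := le_antisymm (not_lt.mp hgt) (not_lt.mp hlt)
    rw [show mergeInter (x :: xs) (y :: ys) = x :: mergeInter xs ys by
      rw [mergeInter]; simp [hlt, hgt]]
    subst hxy
    simp only [List.mem_cons, ih (List.Pairwise.of_cons hx) (List.Pairwise.of_cons hy) c]
    constructor
    · rintro (rfl | ⟨h1, h2⟩)
      · exact ⟨Or.inl rfl, Or.inl rfl⟩
      · exact ⟨Or.inr h1, Or.inr h2⟩
    · rintro ⟨(rfl | h1), (h2 | h2)⟩
      · exact Or.inl rfl
      · exact Or.inl rfl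
      · exact Or.inl h2
      · exact Or.inr ⟨h1, h2⟩

theorem pairwise_mergeInter (xs ys : List Char) (hx : xs.Pairwise (· < ·)) (hy : ys.Pairwise (· < ·)) :
    (mergeInter xs ys).Pairwise (· < ·) := by
  induction xs, ys using mergeInter.induct with
  | case1 ys => simp [mergeInter]
  | case2 x xs => simp [mergeInter]
  | case3 x xs y ys hlt ih =>
    rw [show mergeInter (x :: xs) (y :: ys) = mergeInter xs (y :: ys) by
      rw [mergeInter]; simp [hlt]]
    exact ih (List.Pairwise.of_cons hx) hy
  | case4 x xs y ys hlt hgt ih =>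
    rw [show mergeInter (x :: xs) (y :: ys) = mergeInter (x :: xs) ys by
      rw [mergeInter]; simp [hlt, hgt]]
    exact ih hx (List.Pairwise.of_cons hy)
  | case5 x xs y ys hlt hgt ih =>
    have hxy : x = y := le_antisymm (not_lt.mp hgt) (not_lt.mp hlt)
    rw [show mergeInter (x :: xs) (y :: ys) = x :: mergeInter xs ys by
      rw [mergeInter]; simp [hlt, hgt]]
    subst hxy
    have htl := ih (List.Pairwise.of_cons hx) (List.Pairwise.of_cons hy)
    refine List.pairwise_cons.mpr ⟨fun z hz => ?_, htl⟩
    have := (mem_mergeInter xs ys (List.Pairwise.of_cons hx) (List.Pairwise.of_cons hy) z).mp hz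
    exact List.rel_of_pairwise_cons hx this.1

-- per-pair agreement
theorem pair_eq (a b : String) :
    PySem.List.sorted ((PySem.Str.lower a).toList.foldl (fun sc ch =>
        if PySem.Chars.isIn [ch] (PySem.Str.lower b).toList && !(sc.contains ch) then sc ++ [ch] else sc) [])
      (fun x => x) false =
    mergeInter (PySem.List.sorted (PySem.Set.ofList (PySem.Str.lower a).toList) (fun x => x) false)
               (PySem.List.sorted (PySem.Set.ofList (PySem.Str.lower b).toList) (fun x => x) false) := by
  set al := (PySem.Str.lower a).toList
  set bl := (PySem.Str.lower b).toList
  set X := PySem.List.sorted (PySem.Set.ofList al) (fun x => x) false with hX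
  set Y := PySem.List.sorted (PySem.Set.ofList bl) (fun x => x) false with hY
  have hXp : X.Pairwise (· < ·) := PySem.List.sorted_ofList_pairwise_lt _
  have hYp : Y.Pairwise (· < ·) := PySem.List.sorted_ofList_pairwise_lt _
  obtain ⟨hnd, hmem⟩ := sameChar_loop bl al [] List.nodup_nil
  have hMp : (mergeInter X Y).Pairwise (· < ·) := pairwise_mergeInter X Y hXp hYp
  have hMnd : (mergeInter X Y).Nodup := hMp.imp ne_of_lt
  have hmemM : ∀ c, c ∈ mergeInter X Y ↔ c ∈ al ∧ c ∈ bl := by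
    intro c
    rw [mem_mergeInter X Y hXp hYp c, hX, hY,
      PySem.List.mem_sorted, PySem.List.mem_sorted, PySem.Set.mem_ofList, PySem.Set.mem_ofList]
  have hperm : (mergeInter X Y).Perm (al.foldl (fun sc ch =>
      if PySem.Chars.isIn [ch] bl && !(sc.contains ch) then sc ++ [ch] else sc) []) := by
    refine (List.perm_ext_iff_of_nodup hMnd hnd).mpr fun c => ?_
    rw [hmemM c, hmem c]
    simp
  exact PySem.List.sorted_eq_of_perm_of_pairwise_lt _ _ _ hperm hMp

theorem func4_eq_map (list_A list_B : List String) :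
    func4 list_A list_B = (PySem.List.pyRange 0 (PySem.List.len list_A) 1).map (fun i =>
      String.ofList (PySem.List.sorted ((PySem.Str.lower (PySem.List.pyGetD list_A i "")).toList.foldl
        (fun sc ch => if PySem.Chars.isIn [ch] (PySem.Str.lower (PySem.List.pyGetD list_B i "")).toList
          && !(sc.contains ch) then sc ++ [ch] else sc) []) (fun x => x) false)) := by
  unfold func4
  exact PySem.List.foldl_append_singleton_eq_map (fun i =>
      String.ofList (PySem.List.sorted ((PySem.Str.lower (PySem.List.pyGetD list_A i "")).toList.foldl
        (fun sc ch => if PySem.Chars.isIn [ch] (PySem.Str.lower (PySem.List.pyGetD list_B i "")).toList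
          && !(sc.contains ch) then sc ++ [ch] else sc) []) (fun x => x) false))
    (PySem.List.pyRange 0 (PySem.List.len list_A) 1) []

-- ===== VERDICT (by name: the statement is the Claim_ definition above) =====
theorem func4_spec : Claim_equal_func4 := by
  intro la lb _ hpre
  unfold Pre_func4 at hpre
  unfold Spec_func4 func4_alt
  rw [func4_eq_map]
  apply List.ext_getElem
  · simp [PySem.List.length_pyRange_one, List.length_zip]
    omega
  · intro k h1 h2
    have hk : k < la.length := by
      simpa [PySem.List.length_pyRange_one] using h1
    have hkb : k < lb.length := lt_of_lt_of_le hk hpre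
    simp only [List.getElem_map, PySem.List.getElem_pyRange_one, List.getElem_zip]
    have hz : (0 : Int) + (k : Int) = ((k : Nat) : Int) := by omega
    rw [hz, PySem.List.pyGetD_natCast, PySem.List.pyGetD_natCast,
      List.getD_eq_getElem la "" hk, List.getD_eq_getElem lb "" hkb]
    exact congrArg String.ofList (pair_eq la[k] lb[k])
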